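-- pv_equiv track=rewrite | github.com/Mazhit76/GeekBrains_Python_2020-499 | Lession 4-6.py | sequence_element
-- ===== SOURCE A (Python) =====
-- from itertools import cycle, count
--
-- def sequence_element(user_list, max_cycle=50):
--     count_cycle = 0
--     for j in cycle(user_list):
--         if count_cycle > max_cycle:
--             break
--         else:
--             count_cycle += 1
--             yield j
--     return
-- ===== SOURCE B (Python) =====
-- def sequence_element(user_list, max_cycle=50):
--     # Build the answer in two staged steps instead of iterating element by element:
--     # replicate the whole list ceil(n/len) times, then truncate to n items.
--     n = max_cycle + 1
--     if user_list and n > 0: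
--         reps = -(-n // len(user_list))
--         yield from (user_list * reps)[:n]
-- ===== Notes on version B (the rewrite author's own statement) =====
-- stated objective: idiomatic
-- what changed: Instead of iterating an infinite itertools.cycle with a counter and break, B constructs the whole answer in two staged bulk operations: replicate the list ceil((max_cycle+1)/len) times with list multiplication and truncate the concatenation with a slice, yielding from that.
import Mathlib
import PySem

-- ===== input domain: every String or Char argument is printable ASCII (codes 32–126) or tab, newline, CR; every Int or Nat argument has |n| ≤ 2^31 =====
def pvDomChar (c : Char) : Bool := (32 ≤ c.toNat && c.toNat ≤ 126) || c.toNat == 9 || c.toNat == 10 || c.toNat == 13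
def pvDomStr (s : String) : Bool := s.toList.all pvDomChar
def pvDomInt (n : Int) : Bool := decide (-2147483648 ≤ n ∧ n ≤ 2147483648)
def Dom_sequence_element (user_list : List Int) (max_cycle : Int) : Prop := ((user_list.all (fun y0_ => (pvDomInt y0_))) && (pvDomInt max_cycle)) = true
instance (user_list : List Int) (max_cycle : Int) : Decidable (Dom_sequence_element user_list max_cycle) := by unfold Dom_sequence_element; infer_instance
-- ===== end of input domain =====

-- B replaces A's infinite itertools.cycle iterator with counter-and-break by a staged bulk
-- construction: replicate the list ceil((max_cycle+1)/len) times and slice off the first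
-- max_cycle+1 elements (idiomatic, same cost). Both ports return the LIST of yielded elements.

-- ===== PORT A =====
-- A's for-loop over cycle(user_list): 'cur' is the rest of the current pass, refilled from
-- 'orig' when exhausted; each iteration checks 'count_cycle > max_cycle' then yields.
def seqA_go (orig : List Int) (cur : List Int) (count_cycle max_cycle : Int) : List Int :=
  match cur with
  | [] =>
    match orig with
    | [] => []            -- cycle([]) yields nothing: the generator ends
    | x :: rest =>
      if count_cycle > max_cycle then []
      else x :: seqA_go orig rest (count_cycle + 1) max_cycle
  | x :: rest =>
      if count_cycle > max_cycle then []
      else x :: seqA_go orig rest (count_cycle + 1) max_cycle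
termination_by (max_cycle + 1 - count_cycle).toNat
decreasing_by all_goals (simp_all; try omega)

def sequence_element (user_list : List Int) (max_cycle : Int) : List Int :=
  seqA_go user_list user_list 0 max_cycle

-- ===== PORT B =====
-- Source B: n = max_cycle+1; if list nonempty and n > 0: reps = -(-n // len); yield from (list*reps)[:n]
def sequence_element_alt (user_list : List Int) (max_cycle : Int) : List Int :=
  let n := max_cycle + 1
  if user_list ≠ [] ∧ n > 0 then
    let reps := -(PySem.Int.floordiv (-n) (user_list.length : Int))
    PySem.List.slice (PySem.List.pyRepeat user_list reps) none (some n)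
  else []

-- ===== PRECONDITION & SPEC =====
def Spec_sequence_element (user_list : List Int) (max_cycle : Int) (out : List Int) : Prop := out = sequence_element_alt user_list max_cycle
instance (user_list : List Int) (max_cycle : Int) (out : List Int) : Decidable (Spec_sequence_element user_list max_cycle out) := by unfold Spec_sequence_element; infer_instance

-- ===== CLAIM (what is proved, stated in full; the proofs are below) =====
def Claim_equal_sequence_element : Prop := ∀ (user_list : List Int) (max_cycle : Int), Dom_sequence_element user_list max_cycle → Spec_sequence_element user_list max_cycle (sequence_element user_list max_cycle)

-- ===== LEMMAS AND PROOFS =====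

-- Reference function: k elements of orig cycled, starting at offset d.
def cyc (orig : List Int) : Nat → Nat → List Int
  | 0, _ => []
  | (k+1), d => orig.getD d 0 :: cyc orig k ((d + 1) % orig.length)

lemma seqA_go_nil (orig : List Int) (c m : Int) :
    seqA_go orig [] c m = seqA_go orig orig c m := by
  cases orig with
  | nil => simp [seqA_go]
  | cons x rest => rw [seqA_go, seqA_go]

lemma seqA_go_eq_cyc (orig : List Int) (d : Nat) (hd : d < orig.length)
    (c m : Int) : seqA_go orig (orig.drop d) c m = cyc orig (m + 1 - c).toNat d := by
  by_cases hcm : c > m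
  · have hk : (m + 1 - c).toNat = 0 := by omega
    have hne : orig.drop d ≠ [] := by
      intro h; have := List.drop_eq_nil_iff.mp h; omega
    obtain ⟨x, rest, hx⟩ := List.exists_cons_of_ne_nil hne
    rw [hx, seqA_go, if_pos hcm, hk, cyc]
  · have hk : (m + 1 - c).toNat = (m + 1 - (c+1)).toNat + 1 := by omega
    have hne : orig.drop d ≠ [] := by
      intro h; have := List.drop_eq_nil_iff.mp h; omega
    obtain ⟨x, rest, hx⟩ := List.exists_cons_of_ne_nil hne
    have hcons : x :: rest = orig[d] :: orig.drop (d+1) := by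
      rw [← hx, List.drop_eq_getElem_cons hd]
    have hxd : x = orig.getD d 0 := by
      rw [List.getD_eq_getElem orig 0 hd]
      exact (List.cons.injEq _ _ _ _).mp hcons |>.1
    have hrest : rest = orig.drop (d+1) := by
      exact (List.cons.injEq _ _ _ _).mp hcons |>.2
    rw [hx, seqA_go, if_neg hcm, hk, cyc, hxd, hrest]
    congr 1
    by_cases h1 : d + 1 < orig.length
    · have : (d + 1) % orig.length = d + 1 := Nat.mod_eq_of_lt h1
      rw [this]
      exact seqA_go_eq_cyc orig (d+1) h1 (c+1) m
    · have hlen : d + 1 = orig.length := by omega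
      have h0 : (d + 1) % orig.length = 0 := by rw [hlen]; exact Nat.mod_self _
      rw [h0, hlen, List.drop_length, seqA_go_nil]
      have := seqA_go_eq_cyc orig 0 (by omega) (c+1) m
      simpa using this
termination_by (m + 1 - c).toNat
decreasing_by all_goals omega

-- k cycled elements starting at offset d are a prefix of (tail from d) ++ r extra copies,
-- provided the supply d + k ≤ (r+1)*len does not run out.
lemma cyc_eq_take (orig : List Int) (k d r : Nat) (hd : d < orig.length)
    (hk : d + k ≤ (r + 1) * orig.length) :
    cyc orig k d = ((orig.drop d) ++ (List.replicate r orig).flatten).take k := by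
  induction k generalizing d r with
  | zero => simp [cyc]
  | succ n ih =>
    rw [cyc, List.drop_eq_getElem_cons hd, List.cons_append, List.take_succ_cons]
    congr 1
    · rw [List.getD_eq_getElem orig 0 hd]
    · by_cases h1 : d + 1 < orig.length
      · rw [Nat.mod_eq_of_lt h1]
        exact ih (d+1) r h1 (by omega)
      · have hlen : d + 1 = orig.length := by omega
        have h0 : (d + 1) % orig.length = 0 := by rw [hlen]; exact Nat.mod_self _
        rw [h0, hlen, List.drop_length, List.nil_append]
        cases n with
        | zero => simp [cyc]
        | succ m =>
          obtain ⟨r', rfl⟩ : ∃ r', r = r' + 1 := by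
            rcases r with _ | r'
            · exfalso
              have h1 : (0 + 1) * orig.length = orig.length := by ring
              omega
            · exact ⟨r', rfl⟩
          rw [List.replicate_succ, List.flatten_cons]
          have hmul : (r' + 1 + 1) * orig.length = (r' + 1) * orig.length + orig.length := by
            ring
          have h := ih 0 r' (by omega) (by omega)
          simpa using h

-- ===== VERDICT (by name: the statement is the Claim_ definition above) =====
theorem sequence_element_spec : Claim_equal_sequence_element := by
  intro ul mc _
  unfold Spec_sequence_element sequence_element
  cases ul with
  | nil => simp [seqA_go, sequence_element_alt]
  | cons x rest =>
    have hlen : 0 < (x :: rest).length := by simp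
    have hA := seqA_go_eq_cyc (x :: rest) 0 hlen 0 mc
    rw [List.drop_zero] at hA
    rw [hA]
    by_cases hn : mc + 1 > 0
    · unfold sequence_element_alt
      rw [if_pos ⟨by simp, hn⟩]
      set n : Int := mc + 1 with hn_def
      set reps : Int := -(PySem.Int.floordiv (-n) ((x :: rest).length : Int)) with hreps_def
      have hbounds : (reps - 1) * ((x :: rest).length : Int) < n ∧ n ≤ reps * ((x :: rest).length : Int) :=
        (PySem.Int.neg_floordiv_neg_eq_iff_of_pos (by exact_mod_cast hlen)).mp rfl
      have hreps1 : 1 ≤ reps := by nlinarith [hbounds.1, hbounds.2]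
      rw [PySem.List.slice_to _ (by omega)]
      show cyc (x :: rest) (mc + 1 - 0).toNat 0
          = (PySem.List.pyRepeat (x :: rest) reps).take n.toNat
      have hkk : 0 + n.toNat ≤ ((reps.toNat - 1) + 1) * (x :: rest).length := by
        have h2 := hbounds.2
        have : (n.toNat : Int) ≤ ((reps.toNat : Int)) * ((x :: rest).length : Int) := by
          rw [Int.toNat_of_nonneg (by omega), Int.toNat_of_nonneg (by omega)]
          exact h2
        have hcast : n.toNat ≤ reps.toNat * (x :: rest).length := by exact_mod_cast this
        have hrn : reps.toNat - 1 + 1 = reps.toNat := by omega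
        rw [hrn]
        omega
      have hc := cyc_eq_take (x :: rest) n.toNat 0 (reps.toNat - 1) hlen hkk
      rw [List.drop_zero] at hc
      have hflat : (x :: rest) ++ (List.replicate (reps.toNat - 1) (x :: rest)).flatten
          = (List.replicate reps.toNat (x :: rest)).flatten := by
        obtain ⟨r', hr'⟩ : ∃ r', reps.toNat = r' + 1 := ⟨reps.toNat - 1, by omega⟩
        rw [hr']
        simp [List.replicate_succ]
      rw [hflat] at hc
      have hnn : (mc + 1 - 0).toNat = n.toNat := by omega
      rw [hnn, hc]
      rfl
    · have h0 : (mc + 1 - 0).toNat = 0 := by omega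
      rw [h0]
      unfold sequence_element_alt
      rw [if_neg (by intro h; exact hn h.2)]
      simp [cyc]
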